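-- pv_equiv track=rewrite | github.com/TaranbirBhullar/groupTherapyEvents | skills/sync-partiful-events/scripts/sync_partiful_events.py | unfold_ics_lines
-- ===== SOURCE A (Python) =====
-- def unfold_ics_lines(text: str) -> list[str]:
--     lines = text.replace("\r\n", "\n").replace("\r", "\n").split("\n")
--     unfolded: list[str] = []
--     for line in lines:
--         if line.startswith((" ", "\t")) and unfolded:
--             unfolded[-1] += line[1:]
--         else:
--             unfolded.append(line)
--     return unfolded
-- ===== SOURCE B (Python) =====
-- def unfold_ics_lines(text: str) -> list[str]:
--     norm = text.replace("\r\n", "\n").replace("\r", "\n")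
--     kept = []
--     i = 0
--     n = len(norm)
--     while i < n:
--         if norm[i] == "\n" and i + 1 < n and norm[i + 1] in " \t":
--             i += 2  # delete the fold point: the newline and exactly one whitespace char
--         else:
--             kept.append(norm[i])
--             i += 1
--     return "".join(kept).split("\n")
-- ===== Notes on version B (the rewrite author's own statement) =====
-- stated objective: alternative
-- what changed: Instead of splitting first and looping over lines appending continuation text onto the last accumulated line, B does one character scan over the normalized text that deletes each fold point (a newline followed by one space/tab) and only then splits on newlines.
import Mathlib
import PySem

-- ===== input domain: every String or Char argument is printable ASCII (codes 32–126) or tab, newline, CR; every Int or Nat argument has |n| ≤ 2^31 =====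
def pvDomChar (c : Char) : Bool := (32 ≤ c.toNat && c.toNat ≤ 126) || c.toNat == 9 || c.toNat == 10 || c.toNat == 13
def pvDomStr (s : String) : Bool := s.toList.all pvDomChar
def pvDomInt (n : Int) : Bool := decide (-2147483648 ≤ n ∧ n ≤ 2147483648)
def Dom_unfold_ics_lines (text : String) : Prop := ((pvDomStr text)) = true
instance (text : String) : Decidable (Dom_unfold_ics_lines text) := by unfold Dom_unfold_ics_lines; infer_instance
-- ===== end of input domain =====

-- B replaces A's split-then-fold-onto-last-line loop by one character scan deleting each
-- fold point (newline + one space/tab) before splitting; same cost, different structure.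

-- ===== PORT A =====
-- A, on the char-list side (strings rebuilt at the end):
-- lines = text.replace("\r\n","\n").replace("\r","\n").split("\n"); then the accumulator loop.
def unfold_ics_lines (text : String) : List String :=
  let norm := PySem.Chars.replace (PySem.Chars.replace text.toList ['\r', '\n'] ['\n']) ['\r'] ['\n']
  let lines := PySem.Chars.splitOn norm ['\n']
  let unfolded := lines.foldl (fun unfolded line =>
    if (PySem.Chars.startswith line [' '] || PySem.Chars.startswith line ['\t']) && !unfolded.isEmpty then
      unfolded.dropLast ++ [unfolded.getLastD [] ++ PySem.Chars.slice line (some 1) none]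
    else unfolded ++ [line]) ([] : List (List Char))
  unfolded.map String.ofList

-- ===== PORT B =====
-- B's while-loop scan: delete '\n' followed by one ' '/'\t', keep every other char.
def pvDelFolds : List Char → List Char
  | [] => []
  | [c] => [c]
  | c :: d :: rest =>
    if c = '\n' ∧ (d = ' ' ∨ d = '\t') then pvDelFolds rest
    else c :: pvDelFolds (d :: rest)

def unfold_ics_lines_alt (text : String) : List String :=
  let norm := PySem.Chars.replace (PySem.Chars.replace text.toList ['\r', '\n'] ['\n']) ['\r'] ['\n']
  (PySem.Chars.splitOn (pvDelFolds norm) ['\n']).map String.ofList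

-- ===== PRECONDITION & SPEC =====
def Spec_unfold_ics_lines (text : String) (out : List String) : Prop := out = unfold_ics_lines_alt text
instance (text : String) (out : List String) : Decidable (Spec_unfold_ics_lines text out) := by unfold Spec_unfold_ics_lines; infer_instance

-- ===== CLAIM (what is proved, stated in full; the proofs are below) =====
def Claim_equal_unfold_ics_lines : Prop := ∀ (text : String), Dom_unfold_ics_lines text → Spec_unfold_ics_lines text (unfold_ics_lines text)

-- ===== LEMMAS AND PROOFS =====

-- split on '\n', Python semantics (result always nonempty)
def pvSplitNL : List Char → List (List Char)
  | [] => [[]]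
  | c :: rest => if c = '\n' then [] :: pvSplitNL rest else (pvSplitNL rest).modifyHead (c :: ·)

theorem pvSplitNL_nl (rest : List Char) : pvSplitNL ('\n' :: rest) = [] :: pvSplitNL rest := by
  rw [pvSplitNL, if_pos rfl]

theorem pvSplitNL_cons (c : Char) (rest : List Char) (hc : c ≠ '\n') :
    pvSplitNL (c :: rest) = (pvSplitNL rest).modifyHead (c :: ·) := by
  rw [pvSplitNL, if_neg hc]

theorem pvSplitNL_ne_nil (cs : List Char) : pvSplitNL cs ≠ [] := by
  induction cs with
  | nil => simp [pvSplitNL]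
  | cons c rest ih =>
    by_cases hc : c = '\n'
    · subst hc; rw [pvSplitNL_nl]; simp
    · rw [pvSplitNL_cons c rest hc]
      cases h : pvSplitNL rest with
      | nil => exact absurd h ih
      | cons a as => simp [List.modifyHead]

theorem pvDelFolds_fold (d : Char) (rest : List Char) (hd : d = ' ' ∨ d = '\t') :
    pvDelFolds ('\n' :: d :: rest) = pvDelFolds rest := by
  rw [pvDelFolds, if_pos ⟨rfl, hd⟩]

theorem pvDelFolds_keep (c d : Char) (rest : List Char) (h : ¬(c = '\n' ∧ (d = ' ' ∨ d = '\t'))) :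
    pvDelFolds (c :: d :: rest) = c :: pvDelFolds (d :: rest) := by
  rw [pvDelFolds, if_neg h]

theorem pv_go_nl (fuel : Nat) : ∀ (l cur : List Char) (accs : List (List Char)),
    l.length ≤ fuel →
    PySem.Chars.splitOn.go ['\n'] fuel l cur accs = accs.reverse ++ (pvSplitNL l).modifyHead (cur.reverse ++ ·) := by
  induction fuel with
  | zero =>
    intro l cur accs hl
    have : l = [] := by cases l <;> simp_all
    subst this
    simp [PySem.Chars.splitOn.go, pvSplitNL]
  | succ fuel ih =>
    intro l cur accs hl
    cases l with
    | nil => simp [PySem.Chars.splitOn.go, pvSplitNL]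
    | cons c rest =>
      rw [PySem.Chars.splitOn.go]
      by_cases hc : c = '\n'
      · subst hc
        have hpre : List.isPrefixOf ['\n'] ('\n' :: rest) = true := by
          simp [List.isPrefixOf]
        rw [if_pos hpre]
        rw [show List.drop (['\n'].length) ('\n' :: rest) = rest by simp]
        rw [ih rest [] ((cur.reverse) :: accs) (by simpa using Nat.le_of_succ_le_succ hl)]
        rw [pvSplitNL_nl]
        cases pvSplitNL rest <;> simp [List.modifyHead]
      · have hpre : List.isPrefixOf ['\n'] (c :: rest) = false := by
          simp [List.isPrefixOf]; intro h; exact absurd h.symm hc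
        rw [if_neg (by simp [hpre])]
        rw [ih rest (c :: cur) accs (by simpa using Nat.le_of_succ_le_succ hl)]
        rw [pvSplitNL_cons c rest hc]
        cases h : pvSplitNL rest with
        | nil => exact absurd h (pvSplitNL_ne_nil rest)
        | cons a as => simp [List.modifyHead]

theorem pv_splitOn_nl (cs : List Char) : PySem.Chars.splitOn cs ['\n'] = pvSplitNL cs := by
  rw [PySem.Chars.splitOn, pv_go_nl (cs.length + 1) cs [] [] (by omega)]
  cases h : pvSplitNL cs with
  | nil => exact absurd h (pvSplitNL_ne_nil cs)
  | cons a as => simp [List.modifyHead]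

-- A's loop once the accumulator is nonempty (cur = last accumulated line)
def pvUnfoldG : List Char → List (List Char) → List (List Char)
  | cur, [] => [cur]
  | cur, l :: ls =>
    if l.head? = some ' ' ∨ l.head? = some '\t' then pvUnfoldG (cur ++ l.tail) ls
    else cur :: pvUnfoldG l ls

def pvH : List (List Char) → List (List Char)
  | [] => []
  | a :: as => pvUnfoldG a as

theorem pvUnfoldG_append (ls : List (List Char)) : ∀ (p a : List Char),
    pvUnfoldG (p ++ a) ls = (pvUnfoldG a ls).modifyHead (p ++ ·) := by
  induction ls with
  | nil => intro p a; simp [pvUnfoldG, List.modifyHead]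
  | cons l ls ih =>
    intro p a
    simp only [pvUnfoldG]
    split
    · rw [List.append_assoc, ih]
    · simp [List.modifyHead]

theorem pvH_modifyHead (c : Char) (L : List (List Char)) (hL : L ≠ []) :
    pvH (L.modifyHead (c :: ·)) = (pvH L).modifyHead (c :: ·) := by
  cases L with
  | nil => exact absurd rfl hL
  | cons a as =>
    simp only [List.modifyHead, pvH]
    have := pvUnfoldG_append as [c] a
    simpa using this

-- key lemma: A's line loop equals B's char-level deletion, through the '\n'-split
theorem pv_key (cs : List Char) : pvH (pvSplitNL cs) = pvSplitNL (pvDelFolds cs) := by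
  induction cs using pvDelFolds.induct with
  | case1 => simp [pvSplitNL, pvDelFolds, pvH, pvUnfoldG]
  | case2 c =>
    by_cases hc : c = '\n'
    · subst hc; decide
    · rw [show pvDelFolds [c] = [c] from by rw [pvDelFolds]]
      rw [pvSplitNL_cons c [] hc]
      simp [pvSplitNL, pvH, pvUnfoldG, List.modifyHead]
  | case3 c d rest hcd ih =>
    -- fold point: c = '\n', d ∈ {' ', '\t'}
    obtain ⟨hc, hd⟩ := hcd
    subst hc
    have hdn : d ≠ '\n' := by rcases hd with h | h <;> simp [h]
    rw [pvDelFolds_fold d rest hd, ← ih, pvSplitNL_nl, pvSplitNL_cons d rest hdn]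
    cases h : pvSplitNL rest with
    | nil => exact absurd h (pvSplitNL_ne_nil rest)
    | cons a as =>
      simp only [List.modifyHead, pvH, pvUnfoldG]
      rw [if_pos (by rcases hd with h | h <;> subst h <;> simp)]
      simp
  | case4 c d rest hcd ih =>
    rw [pvDelFolds_keep c d rest hcd]
    by_cases hc : c = '\n'
    · subst hc
      have hd : d ≠ ' ' ∧ d ≠ '\t' := by
        constructor <;> intro h <;> exact hcd ⟨rfl, by simp [h]⟩
      rw [pvSplitNL_nl, show pvSplitNL ('\n' :: pvDelFolds (d :: rest)) = [] :: pvSplitNL (pvDelFolds (d :: rest)) from pvSplitNL_nl _, ← ih]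
      -- the head of pvSplitNL (d :: rest) does not start with fold whitespace
      have hhead : ∀ L, L = pvSplitNL (d :: rest) → pvH ([] :: L) = [] :: pvH L := by
        intro L hL
        cases L with
        | nil => exact absurd hL.symm (pvSplitNL_ne_nil _)
        | cons a as =>
          have ha : a.head? ≠ some ' ' ∧ a.head? ≠ some '\t' := by
            by_cases hdn : d = '\n'
            · subst hdn
              rw [pvSplitNL_nl] at hL
              cases hL; simp
            · rw [pvSplitNL_cons d rest hdn] at hL
              cases hs : pvSplitNL rest with
              | nil => exact absurd hs (pvSplitNL_ne_nil rest)
              | cons b bs =>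
                rw [hs] at hL
                simp only [List.modifyHead] at hL
                have : a = d :: b := (List.cons.injEq _ _ _ _ ▸ hL).1
                subst this
                simp only [List.head?]
                exact ⟨by intro h; exact hd.1 (by simpa using h), by intro h; exact hd.2 (by simpa using h)⟩
          simp only [pvH, pvUnfoldG]
          rw [if_neg (by push_neg; exact ha)]
      exact hhead _ rfl
    · rw [pvSplitNL_cons c _ hc, pvH_modifyHead c _ (pvSplitNL_ne_nil _), ih]
      rw [pvSplitNL_cons c _ hc]

-- startswith on a one-char prefix, as a head? test
theorem pv_startswith_single (l : List Char) (c : Char) :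
    PySem.Chars.startswith l [c] = (l.head? == some c) := by
  cases l with
  | nil => simp [PySem.Chars.startswith, List.isPrefixOf]
  | cons a rest =>
    simp only [PySem.Chars.startswith, List.isPrefixOf, List.head?]
    simp [eq_comm]

-- A's foldl, once the accumulator is a nonempty list acc ++ [cur], is pvUnfoldG
theorem pv_foldA (ls : List (List Char)) : ∀ (acc : List (List Char)) (cur : List Char),
    ls.foldl (fun unfolded line =>
      if (PySem.Chars.startswith line [' '] || PySem.Chars.startswith line ['\t']) && !unfolded.isEmpty then
        unfolded.dropLast ++ [unfolded.getLastD [] ++ PySem.Chars.slice line (some 1) none]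
      else unfolded ++ [line]) (acc ++ [cur]) = acc ++ pvUnfoldG cur ls := by
  induction ls with
  | nil => intro acc cur; simp [pvUnfoldG]
  | cons l ls ih =>
    intro acc cur
    simp only [List.foldl_cons]
    by_cases hws : l.head? = some ' ' ∨ l.head? = some '\t'
    · rw [if_pos]
      · have h1 : (acc ++ [cur]).dropLast = acc := by simp
        have h2 : (acc ++ [cur]).getLastD [] = cur := by simp
        have h3 : PySem.Chars.slice l (some 1) none = l.tail := by
          simpa using PySem.List.slice_from_one (xs := l)
        rw [h1, h2, h3, ih acc (cur ++ l.tail)]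
        simp only [pvUnfoldG, if_pos hws]
      · simp only [pv_startswith_single, Bool.and_eq_true, Bool.or_eq_true, beq_iff_eq]
        constructor
        · exact hws
        · simp
    · rw [if_neg]
      · rw [show acc ++ [cur] ++ [l] = (acc ++ [cur]) ++ [l] by simp, ih (acc ++ [cur]) l]
        simp only [pvUnfoldG, if_neg hws]
        simp
      · simp only [pv_startswith_single, Bool.and_eq_true, Bool.or_eq_true, beq_iff_eq]
        intro h
        exact hws h.1

-- ===== VERDICT (by name: the statement is the Claim_ definition above) =====
theorem unfold_ics_lines_spec : Claim_equal_unfold_ics_lines := by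
  intro text _
  unfold Spec_unfold_ics_lines unfold_ics_lines unfold_ics_lines_alt
  simp only [pv_splitOn_nl]
  set norm := PySem.Chars.replace (PySem.Chars.replace text.toList ['\r', '\n'] ['\n']) ['\r'] ['\n'] with hnorm
  cases h : pvSplitNL norm with
  | nil => exact absurd h (pvSplitNL_ne_nil norm)
  | cons a as =>
    have hkey : pvH (pvSplitNL norm) = pvSplitNL (pvDelFolds norm) := pv_key norm
    rw [h] at hkey
    simp only [List.foldl_cons]
    rw [show (if (PySem.Chars.startswith a [' '] || PySem.Chars.startswith a ['\t']) && !(([] : List (List Char)).isEmpty) then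
          ([] : List (List Char)).dropLast ++ [([] : List (List Char)).getLastD [] ++ PySem.Chars.slice a (some 1) none]
        else ([] : List (List Char)) ++ [a]) = [a] by simp]
    rw [show ([a] : List (List Char)) = [] ++ [a] by simp, pv_foldA as [] a]
    simp only [List.nil_append]
    rw [show pvUnfoldG a as = pvH (a :: as) from rfl, hkey]
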